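-- pv_equiv track=rewrite | github.com/YoonKim1106/codetree-TILs | 240926/ab 사이에 없는 c/c-between-a-and-b-2.py | aaa
-- ===== SOURCE A (Python) =====
-- def aaa(a,b,c):
--     st = True
--     for i in range(a,b+1):
--         if i % c == 0:   # c의 배수가 있음
--             st = False
--
--     if st == False:
--         return 'NO'
--     else:
--         return 'YES'
-- ===== SOURCE B (Python) =====
-- def aaa(a, b, c):
--     # Closed form: count of multiples of |c| in [a,b] is b//|c| - (a-1)//|c|.
--     m = abs(c)
--     return 'NO' if a <= b and b // m - (a - 1) // m > 0 else 'YES'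
-- ===== Notes on version B (the rewrite author's own statement) =====
-- stated objective: faster
-- what changed: Replaces the O(b-a) scan of [a,b] for a multiple of c by the O(1) floor-division count b//|c| - (a-1)//|c| > 0.
import Mathlib
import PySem

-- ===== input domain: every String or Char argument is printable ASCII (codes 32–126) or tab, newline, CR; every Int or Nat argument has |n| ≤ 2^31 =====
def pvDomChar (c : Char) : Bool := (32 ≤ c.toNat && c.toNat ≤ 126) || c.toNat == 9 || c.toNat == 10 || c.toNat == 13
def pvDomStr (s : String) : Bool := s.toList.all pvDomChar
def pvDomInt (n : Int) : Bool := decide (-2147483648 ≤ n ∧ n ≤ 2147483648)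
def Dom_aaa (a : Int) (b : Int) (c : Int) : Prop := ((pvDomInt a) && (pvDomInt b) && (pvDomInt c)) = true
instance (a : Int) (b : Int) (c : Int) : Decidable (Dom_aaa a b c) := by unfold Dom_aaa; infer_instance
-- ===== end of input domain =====

-- B replaces A's O(b-a) scan for a multiple of c by the O(1) count b//|c| - (a-1)//|c| > 0.

-- ===== PORT A =====
def aaa (a : Int) (b : Int) (c : Int) : String :=
  let st := (PySem.List.pyRange a (b + 1) 1).foldl
    (fun st i => if PySem.Int.mod i c = 0 then false else st) true
  if st = false then "NO" else "YES"

-- ===== PORT B =====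
def aaa_alt (a : Int) (b : Int) (c : Int) : String :=
  if a ≤ b ∧ 0 < PySem.Int.floordiv b |c| - PySem.Int.floordiv (a - 1) |c| then "NO" else "YES"

-- ===== PRECONDITION & SPEC =====
-- Pre_ excludes exactly c = 0 with a ≤ b (nonempty range): there Python A raises ZeroDivisionError.
def Pre_aaa (a : Int) (b : Int) (c : Int) : Prop := c ≠ 0 ∨ b < a
instance (a : Int) (b : Int) (c : Int) : Decidable (Pre_aaa a b c) := by unfold Pre_aaa; infer_instance
def pvWitness_aaa : Int × Int × Int := (3, 10, 4)

def Spec_aaa (a : Int) (b : Int) (c : Int) (out : String) : Prop := out = aaa_alt a b c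
instance (a : Int) (b : Int) (c : Int) (out : String) : Decidable (Spec_aaa a b c out) := by unfold Spec_aaa; infer_instance

-- ===== CLAIM (what is proved, stated in full; the proofs are below) =====
def Claim_equal_aaa : Prop := ∀ (a : Int) (b : Int) (c : Int), Dom_aaa a b c → Pre_aaa a b c → Spec_aaa a b c (aaa a b c)

-- ===== LEMMAS AND PROOFS =====

-- A's loop never resets st: the final flag is the conjunction over the list.
theorem foldl_flag (c : Int) (l : List Int) (st0 : Bool) :
    l.foldl (fun st i => if PySem.Int.mod i c = 0 then false else st) st0
      = (st0 && l.all (fun i => !(PySem.Int.mod i c == 0))) := by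
  induction l generalizing st0 with
  | nil => simp
  | cons x xs ih =>
    simp only [List.foldl_cons, List.all_cons, ih]
    by_cases h : PySem.Int.mod x c = 0
    · simp [h]
    · have h' : (!(PySem.Int.mod x c == 0)) = true := by simp [h]
      rw [h']
      simp [decide_eq_false h]

-- counting bracket: a positive floor-division count ↔ a multiple of m lies in [a,b]  (m > 0)
theorem count_pos_iff (a b m : Int) (hm : 0 < m) :
    PySem.Int.floordiv (a - 1) m < PySem.Int.floordiv b m ↔ ∃ k : Int, a ≤ k * m ∧ k * m ≤ b := by
  constructor
  · intro h
    refine ⟨PySem.Int.floordiv b m, ?_, ?_⟩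
    · have := (PySem.Int.floordiv_lt_iff_lt_mul (a := a - 1) (b := m)
        (q := PySem.Int.floordiv b m) hm).mp h
      omega
    · have := (PySem.Int.le_floordiv_iff_mul_le (a := b) (b := m)
        (q := PySem.Int.floordiv b m) hm).mp le_rfl
      omega
  · rintro ⟨k, h1, h2⟩
    have hk1 : PySem.Int.floordiv (a - 1) m < k :=
      (PySem.Int.floordiv_lt_iff_lt_mul (a := a - 1) (b := m) (q := k) hm).mpr (by omega)
    have hk2 : k ≤ PySem.Int.floordiv b m :=
      (PySem.Int.le_floordiv_iff_mul_le (a := b) (b := m) (q := k) hm).mpr (by omega)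
    omega

-- ===== VERDICT (by name: the statement is the Claim_ definition above) =====
theorem aaa_spec : Claim_equal_aaa := by
  intro a b c _ hpre
  unfold Spec_aaa aaa aaa_alt
  simp only [foldl_flag]
  by_cases hab : a ≤ b
  · have hc : c ≠ 0 := by
      rcases hpre with h | h
      · exact h
      · omega
    have hm : 0 < |c| := abs_pos.mpr hc
    have key : ((PySem.List.pyRange a (b + 1) 1).all
        (fun i => !(PySem.Int.mod i c == 0)) = false)
        ↔ PySem.Int.floordiv (a - 1) |c| < PySem.Int.floordiv b |c| := by
      rw [count_pos_iff a b |c| hm]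
      simp only [List.all_eq_false, PySem.List.mem_pyRange_one,
        Bool.not_eq_true, Bool.not_eq_false', beq_iff_eq, PySem.Int.mod_eq_zero_iff_dvd]
      constructor
      · rintro ⟨i, ⟨hi1, hi2⟩, hdvd⟩
        rcases (abs_dvd c i).mpr hdvd with ⟨k, hk⟩
        have hk' : i = k * |c| := by rw [hk, mul_comm]
        exact ⟨k, by omega, by omega⟩
      · rintro ⟨k, h1, h2⟩
        refine ⟨k * |c|, ⟨by omega, by omega⟩, (abs_dvd c (k * |c|)).mp ⟨k, mul_comm _ _⟩⟩
    by_cases hall : (PySem.List.pyRange a (b + 1) 1).all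
        (fun i => !(PySem.Int.mod i c == 0)) = false
    · have := key.mp hall
      simp [hall, hab, this]
    · have hnt : ¬ PySem.Int.floordiv (a - 1) |c| < PySem.Int.floordiv b |c| :=
        fun h => hall (key.mpr h)
      simp only [Bool.not_eq_false] at hall
      simp [hall]
      omega
  · have : PySem.List.pyRange a (b + 1) 1 = [] := PySem.List.pyRange_one_eq_nil (by omega)
    simp [this, hab]
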